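-- pv_equiv track=rewrite | github.com/SveterCZE/advent-of-code-2022 | day9/day9.py | move_tail
-- ===== SOURCE A (Python) =====
-- def check_tail_next(head_coordinate, tail_coordinate):
--     if abs(head_coordinate[0] - tail_coordinate[0]) <= 1 and abs(head_coordinate[1] - tail_coordinate[1]) <= 1:
--         return True
--     else:
--         return False
--
-- def move_tail(head_coordinate, tail_coordinate):
--     # Move across both x and y axis
--     if head_coordinate[0] != tail_coordinate[0] and head_coordinate[1] != tail_coordinate[1]:
--         potential_solutions = generate_potential_solutions_x_and_y(tail_coordinate)
--         for potential_move in potential_solutions: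
--             if check_tail_next(head_coordinate, potential_move):
--                 return potential_move
--
--     # Move accross x axis
--     if head_coordinate[0] != tail_coordinate[0] and head_coordinate[1] == tail_coordinate[1]:
--         potential_solutions = generate_potential_solutions_x(tail_coordinate)
--         for potential_move in potential_solutions:
--             if check_tail_next(head_coordinate, potential_move):
--                 return potential_move
--
--     # Move accross y axis
--     if head_coordinate[0] == tail_coordinate[0] and head_coordinate[1] != tail_coordinate[1]:
--         potential_solutions = generate_potential_solutions_y(tail_coordinate)
--         for potential_move in potential_solutions:
--             if check_tail_next(head_coordinate, potential_move):
--                 return potential_move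
--
-- def generate_potential_solutions_x_and_y(tail_coordinate):
--     x1 = (tail_coordinate[0] + 1, tail_coordinate[1] + 1)
--     x2 = (tail_coordinate[0] + 1, tail_coordinate[1] - 1)
--     x3 = (tail_coordinate[0] - 1, tail_coordinate[1] - 1)
--     x4 = (tail_coordinate[0] - 1 ,tail_coordinate[1] + 1)
--     return[x1, x2, x3, x4]
--
-- def generate_potential_solutions_x(tail_coordinate):
--     x1 = (tail_coordinate[0] + 1, tail_coordinate[1])
--     x2 = (tail_coordinate[0] - 1, tail_coordinate[1])
--     return [x1, x2]
--
-- def generate_potential_solutions_y(tail_coordinate):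
--     x1 = (tail_coordinate[0], tail_coordinate[1] + 1)
--     x2 = (tail_coordinate[0], tail_coordinate[1] - 1)
--     return [x1, x2]
-- ===== SOURCE B (Python) =====
-- def move_tail(head_coordinate, tail_coordinate):
--     dx = head_coordinate[0] - tail_coordinate[0]
--     dy = head_coordinate[1] - tail_coordinate[1]
--     if (dx == 0 and dy == 0) or abs(dx) > 2 or abs(dy) > 2:
--         return None
--     sx = (dx > 0) - (dx < 0)
--     sy = (dy > 0) - (dy < 0)
--     return (tail_coordinate[0] + sx, tail_coordinate[1] + sy)
-- ===== Notes on version B (the rewrite author's own statement) =====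
-- stated objective: simpler
-- what changed: B replaces A's candidate-list generation and linear scan with the 4-or-2 neighbour check with a closed-form sign/distance computation: dx,dy, a single distance test, and one step of sign(dx),sign(dy); A's fall-through None (head farther than 2 on an axis, or head equal to tail) is reproduced by the distance test.
import Mathlib
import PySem

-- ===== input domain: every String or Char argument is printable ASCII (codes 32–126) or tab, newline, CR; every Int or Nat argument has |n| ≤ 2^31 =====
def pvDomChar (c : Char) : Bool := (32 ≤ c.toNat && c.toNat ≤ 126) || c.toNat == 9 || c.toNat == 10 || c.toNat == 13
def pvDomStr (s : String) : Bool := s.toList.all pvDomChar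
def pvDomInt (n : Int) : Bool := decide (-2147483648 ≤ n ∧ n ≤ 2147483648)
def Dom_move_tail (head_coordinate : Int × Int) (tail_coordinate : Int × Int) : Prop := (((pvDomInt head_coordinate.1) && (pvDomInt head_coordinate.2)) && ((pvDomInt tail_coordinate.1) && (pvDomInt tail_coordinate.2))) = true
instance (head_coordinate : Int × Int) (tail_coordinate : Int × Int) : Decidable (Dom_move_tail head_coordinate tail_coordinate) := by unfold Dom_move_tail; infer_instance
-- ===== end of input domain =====

-- ===== PORT A =====
-- B replaces A's candidate generation + scan with a closed-form sign/distance step; equivalence is exact (no Pre_).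
def check_tail_next (head_coordinate : Int × Int) (tail_coordinate : Int × Int) : Bool :=
  if (head_coordinate.1 - tail_coordinate.1).natAbs ≤ 1 ∧ (head_coordinate.2 - tail_coordinate.2).natAbs ≤ 1 then
    true
  else
    false

def generate_potential_solutions_x_and_y (t : Int × Int) : List (Int × Int) :=
  [(t.1 + 1, t.2 + 1), (t.1 + 1, t.2 - 1), (t.1 - 1, t.2 - 1), (t.1 - 1, t.2 + 1)]

def generate_potential_solutions_x (t : Int × Int) : List (Int × Int) :=
  [(t.1 + 1, t.2), (t.1 - 1, t.2)]

def generate_potential_solutions_y (t : Int × Int) : List (Int × Int) :=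
  [(t.1, t.2 + 1), (t.1, t.2 - 1)]

-- the 'for … if check: return' loop of A, returning the first accepted candidate
def moveTailLoop (head_coordinate : Int × Int) : List (Int × Int) → Option (Int × Int)
  | [] => none
  | c :: rest => if check_tail_next head_coordinate c then some c else moveTailLoop head_coordinate rest

-- 'if the block above returned a value, return it; otherwise run the rest of the function'
def pyFirst {α : Type} (x : Option α) (y : Option α) : Option α :=
  match x with
  | some m => some m
  | none => y

def move_tail (head_coordinate : Int × Int) (tail_coordinate : Int × Int) : Option (Int × Int) :=
  pyFirst
    (if head_coordinate.1 ≠ tail_coordinate.1 ∧ head_coordinate.2 ≠ tail_coordinate.2 then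
       moveTailLoop head_coordinate (generate_potential_solutions_x_and_y tail_coordinate)
     else none)
    (pyFirst
      (if head_coordinate.1 ≠ tail_coordinate.1 ∧ head_coordinate.2 = tail_coordinate.2 then
         moveTailLoop head_coordinate (generate_potential_solutions_x tail_coordinate)
       else none)
      (if head_coordinate.1 = tail_coordinate.1 ∧ head_coordinate.2 ≠ tail_coordinate.2 then
         moveTailLoop head_coordinate (generate_potential_solutions_y tail_coordinate)
       else none))

-- ===== PORT B =====
def pySign (v : Int) : Int :=
  (if v > 0 then (1 : Int) else 0) - (if v < 0 then (1 : Int) else 0)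

def move_tail_alt (head_coordinate : Int × Int) (tail_coordinate : Int × Int) : Option (Int × Int) :=
  let dx := head_coordinate.1 - tail_coordinate.1
  let dy := head_coordinate.2 - tail_coordinate.2
  if (dx = 0 ∧ dy = 0) ∨ dx.natAbs > 2 ∨ dy.natAbs > 2 then none
  else some (tail_coordinate.1 + pySign dx, tail_coordinate.2 + pySign dy)

-- ===== PRECONDITION & SPEC =====
def Spec_move_tail (head_coordinate : Int × Int) (tail_coordinate : Int × Int) (out : Option (Int × Int)) : Prop := out = move_tail_alt head_coordinate tail_coordinate
instance (head_coordinate : Int × Int) (tail_coordinate : Int × Int) (out : Option (Int × Int)) : Decidable (Spec_move_tail head_coordinate tail_coordinate out) := by unfold Spec_move_tail; infer_instance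

-- ===== CLAIM (what is proved, stated in full; the proofs are below) =====
def Claim_equal_move_tail : Prop := ∀ (head_coordinate : Int × Int) (tail_coordinate : Int × Int), Dom_move_tail head_coordinate tail_coordinate → Spec_move_tail head_coordinate tail_coordinate (move_tail head_coordinate tail_coordinate)

-- ===== LEMMAS AND PROOFS =====

theorem pyFirst_none_right {α : Type} (x : Option α) : pyFirst x none = x := by
  cases x <;> rfl

set_option maxHeartbeats 1000000 in
theorem loop_xy_eq (h1 h2 t1 t2 : Int) (hx : h1 ≠ t1) (hy : h2 ≠ t2) :
    moveTailLoop (h1, h2) (generate_potential_solutions_x_and_y (t1, t2)) =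
      move_tail_alt (h1, h2) (t1, t2) := by
  simp only [moveTailLoop, generate_potential_solutions_x_and_y, check_tail_next,
    move_tail_alt, pySign]
  split_ifs <;> first
    | rfl
    | contradiction
    | omega

set_option maxHeartbeats 1000000 in
theorem loop_x_eq (h1 h2 t1 t2 : Int) (hx : h1 ≠ t1) (hy : h2 = t2) :
    moveTailLoop (h1, h2) (generate_potential_solutions_x (t1, t2)) =
      move_tail_alt (h1, h2) (t1, t2) := by
  subst hy
  simp only [moveTailLoop, generate_potential_solutions_x, check_tail_next,
    move_tail_alt, pySign]
  split_ifs <;> first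
    | rfl
    | contradiction
    | omega
    | (simp only [Option.some.injEq, Prod.mk.injEq]; exact ⟨by omega, by omega⟩)

set_option maxHeartbeats 1000000 in
theorem loop_y_eq (h1 h2 t1 t2 : Int) (hx : h1 = t1) (hy : h2 ≠ t2) :
    moveTailLoop (h1, h2) (generate_potential_solutions_y (t1, t2)) =
      move_tail_alt (h1, h2) (t1, t2) := by
  subst hx
  simp only [moveTailLoop, generate_potential_solutions_y, check_tail_next,
    move_tail_alt, pySign]
  split_ifs <;> first
    | rfl
    | contradiction
    | omega
    | (simp only [Option.some.injEq, Prod.mk.injEq]; exact ⟨by omega, by omega⟩)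

-- ===== VERDICT (by name: the statement is the Claim_ definition above) =====
theorem move_tail_spec : Claim_equal_move_tail := by
  intro h t _
  obtain ⟨h1, h2⟩ := h
  obtain ⟨t1, t2⟩ := t
  unfold Spec_move_tail move_tail
  by_cases e1 : h1 = t1 <;> by_cases e2 : h2 = t2
  · rw [if_neg (by tauto), if_neg (by tauto), if_neg (by tauto)]
    show (none : Option (Int × Int)) = move_tail_alt (h1, h2) (t1, t2)
    simp [move_tail_alt, e1, e2]
  · rw [if_neg (by tauto), if_neg (by tauto), if_pos ⟨e1, e2⟩]
    show moveTailLoop (h1, h2) (generate_potential_solutions_y (t1, t2)) =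
      move_tail_alt (h1, h2) (t1, t2)
    exact loop_y_eq h1 h2 t1 t2 e1 e2
  · rw [if_neg (by tauto), if_pos ⟨e1, e2⟩, if_neg (by tauto)]
    show pyFirst (moveTailLoop (h1, h2) (generate_potential_solutions_x (t1, t2))) none =
      move_tail_alt (h1, h2) (t1, t2)
    rw [pyFirst_none_right]
    exact loop_x_eq h1 h2 t1 t2 e1 e2
  · rw [if_pos ⟨e1, e2⟩, if_neg (by tauto), if_neg (by tauto)]
    show pyFirst (moveTailLoop (h1, h2) (generate_potential_solutions_x_and_y (t1, t2))) none =
      move_tail_alt (h1, h2) (t1, t2)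
    rw [pyFirst_none_right]
    exact loop_xy_eq h1 h2 t1 t2 e1 e2
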